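-- pv_equiv track=rewrite | github.com/tbasten/govhack24 | app.py | create_nested_structure
-- ===== SOURCE A (Python) =====
-- def create_nested_structure(location, location_data, parent=None):
--     nested_structure = {}
--     if parent:
--         nested_structure[parent] = {}
--     for asset_location, assets in location_data.items():
--         nested_structure[asset_location] = {}
--         for asset, sensors in assets.items():
--             nested_structure[asset_location][asset] = {}
--             for sensor_type, sensor_list in sensors.items():
--                 nested_structure[asset_location][asset][sensor_type] = {}
--                 for sensor_id in sensor_list:
--                     nested_structure[asset_location][asset][sensor_type][sensor_id] = []
--     return nested_structure
-- ===== SOURCE B (Python) =====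
-- def create_nested_structure(location, location_data, parent=None):
--     def build(node, depth):
--         if depth == 3:
--             return {sensor_id: [] for sensor_id in node}
--         return {key: build(child, depth + 1) for key, child in node.items()}
--     result = {}
--     if parent:
--         result[parent] = {}
--     result.update(build(location_data, 0))
--     return result
-- ===== Notes on version B (the rewrite author's own statement) =====
-- stated objective: simpler
-- what changed: A mutates one result dict through four nested loops with repeated nested-key lookups (ns[loc][asset][type][id] = []); B builds the mirrored structure bottom-up with a fixed-depth recursive comprehension helper and merges it into the optional parent entry via dict.update.
import Mathlib
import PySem

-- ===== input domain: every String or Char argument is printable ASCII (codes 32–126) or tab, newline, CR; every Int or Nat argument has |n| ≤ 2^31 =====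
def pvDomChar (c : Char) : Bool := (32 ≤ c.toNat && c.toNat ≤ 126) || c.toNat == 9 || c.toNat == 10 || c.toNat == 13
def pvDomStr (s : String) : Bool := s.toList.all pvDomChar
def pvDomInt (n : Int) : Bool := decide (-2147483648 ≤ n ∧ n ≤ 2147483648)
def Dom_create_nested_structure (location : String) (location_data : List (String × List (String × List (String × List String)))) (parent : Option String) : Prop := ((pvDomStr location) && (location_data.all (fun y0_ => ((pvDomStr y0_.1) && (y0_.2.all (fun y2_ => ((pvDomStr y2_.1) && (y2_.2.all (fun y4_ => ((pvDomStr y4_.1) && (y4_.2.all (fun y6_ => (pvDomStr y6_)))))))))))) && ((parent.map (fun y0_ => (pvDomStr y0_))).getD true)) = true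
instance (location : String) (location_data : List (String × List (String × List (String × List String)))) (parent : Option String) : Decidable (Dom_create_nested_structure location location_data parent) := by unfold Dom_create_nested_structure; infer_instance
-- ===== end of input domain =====

-- B replaces A's four nested mutate-in-place loops by a per-level mirror builder
-- composed bottom-up (leaf dict of empty lists, then three dict-comprehension levels)
-- merged into the parent entry with dict.update; same result, different decomposition.
-- Equivalence of RETURN values is proved for all inputs (no precondition).

-- Exact hand port of Python dict assignment d[k] = v on an insertion-ordered
-- association list: overwrite in place for an existing (first-matching) key,
-- append a new key at the end — exactly CPython dict semantics for str keys.
def pvIns {α : Type} (d : List (String × α)) (k : String) (v : α) : List (String × α) :=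
  match d with
  | [] => [(k, v)]
  | (k', v') :: t => if k' = k then (k', v) :: t else (k', v') :: pvIns t k v

-- Exact hand port of Python's d[k].⟨mutation⟩ (read the value at key k, mutate it,
-- value stays at its position); in both programs the key is always present.
def pvMod {α : Type} (d : List (String × α)) (k : String) (f : α → α) : List (String × α) :=
  match d with
  | [] => []
  | (k', v') :: t => if k' = k then (k', f v') :: t else (k', v') :: pvMod t k f

-- ===== PORT A =====
def create_nested_structure (location : String) (location_data : List (String × List (String × List (String × List String)))) (parent : Option String) : List (String × List (String × List (String × List (String × List String)))) :=
  let ns : List (String × List (String × List (String × List (String × List String)))) := []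
  let ns := match parent with      -- `if parent:` — None and "" are falsy
    | none => ns
    | some p => if p = "" then ns else pvIns ns p []
  location_data.foldl (fun ns la =>
    let ns := pvIns ns la.1 []
    la.2.foldl (fun ns asst =>
      let ns := pvMod ns la.1 (fun d => pvIns d asst.1 [])
      asst.2.foldl (fun ns sen =>
        let ns := pvMod ns la.1 (fun d => pvMod d asst.1 (fun e => pvIns e sen.1 []))
        sen.2.foldl (fun ns sid =>
          pvMod ns la.1 (fun d => pvMod d asst.1 (fun e => pvMod e sen.1 (fun f => pvIns f sid ([] : List String))))) ns) ns) ns) ns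

-- ===== PORT B =====
-- build(node, 3): {sensor_id: [] for sensor_id in node}
def pvBuild3 (node : List String) : List (String × List String) :=
  node.foldl (fun d sid => pvIns d sid []) []
-- build(node, 2)
def pvBuild2 (node : List (String × List String)) : List (String × List (String × List String)) :=
  node.foldl (fun d kv => pvIns d kv.1 (pvBuild3 kv.2)) []
-- build(node, 1)
def pvBuild1 (node : List (String × List (String × List String))) : List (String × List (String × List (String × List String))) :=
  node.foldl (fun d kv => pvIns d kv.1 (pvBuild2 kv.2)) []
-- build(node, 0)
def pvBuild0 (node : List (String × List (String × List (String × List String)))) : List (String × List (String × List (String × List (String × List String))))  :=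
  node.foldl (fun d kv => pvIns d kv.1 (pvBuild1 kv.2)) []
-- result.update(d): insert d's items in order
def pvUpd {α : Type} (r : List (String × α)) (d : List (String × α)) : List (String × α) :=
  d.foldl (fun r kv => pvIns r kv.1 kv.2) r

def create_nested_structure_alt (location : String) (location_data : List (String × List (String × List (String × List String)))) (parent : Option String) : List (String × List (String × List (String × List (String × List String)))) :=
  let result : List (String × List (String × List (String × List (String × List String)))) :=
    match parent with
    | none => []
    | some p => if p = "" then [] else pvIns [] p []
  pvUpd result (pvBuild0 location_data)

-- ===== PRECONDITION & SPEC =====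
def Spec_create_nested_structure (location : String) (location_data : List (String × List (String × List (String × List String)))) (parent : Option String) (out : List (String × List (String × List (String × List (String × List String))))) : Prop := out = create_nested_structure_alt location location_data parent
instance (location : String) (location_data : List (String × List (String × List (String × List String)))) (parent : Option String) (out : List (String × List (String × List (String × List (String × List String))))) : Decidable (Spec_create_nested_structure location location_data parent out) := by
  unfold Spec_create_nested_structure
  -- instance search times out on the deeply nested type; build it in shallow stages
  letI i2 : DecidableEq (List (String × List (String × List String))) := inferInstance
  letI i3 : DecidableEq (List (String × List (String × List (String × List String)))) :=
    @instDecidableEqList _ (@instDecidableEqProd _ _ _ i2)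
  letI i4 : DecidableEq (List (String × List (String × List (String × List (String × List String))))) :=
    @instDecidableEqList _ (@instDecidableEqProd _ _ _ i3)
  exact i4 _ _

-- ===== CLAIM (what is proved, stated in full; the proofs are below) =====
def Claim_equal_create_nested_structure : Prop := ∀ (location : String) (location_data : List (String × List (String × List (String × List String)))) (parent : Option String), Dom_create_nested_structure location location_data parent → Spec_create_nested_structure location location_data parent (create_nested_structure location location_data parent)

-- ===== LEMMAS AND PROOFS =====

theorem pvMod_pvIns {α : Type} (d : List (String × α)) (k : String) (v : α) (f : α → α) :
    pvMod (pvIns d k v) k f = pvIns d k (f v) := by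
  induction d with
  | nil => simp [pvIns, pvMod]
  | cons h t ih =>
    obtain ⟨k', v'⟩ := h
    by_cases hk : k' = k <;> simp [pvIns, pvMod, hk, ih]

theorem pvIns_pvIns {α : Type} (d : List (String × α)) (k : String) (v w : α) :
    pvIns (pvIns d k v) k w = pvIns d k w := by
  induction d with
  | nil => simp [pvIns]
  | cons h t ih =>
    obtain ⟨k', v'⟩ := h
    by_cases hk : k' = k <;> simp [pvIns, hk, ih]

theorem mem_keys_pvIns_self {α : Type} (d : List (String × α)) (k : String) (v : α) :
    k ∈ (pvIns d k v).map Prod.fst := by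
  induction d with
  | nil => simp [pvIns]
  | cons h t ih =>
    obtain ⟨k', v'⟩ := h
    by_cases hk : k' = k <;> simp [pvIns, hk, ih]

theorem mem_keys_pvIns_iff {α : Type} (d : List (String × α)) (k k' : String) (v : α) :
    k' ∈ (pvIns d k v).map Prod.fst ↔ k' = k ∨ k' ∈ d.map Prod.fst := by
  induction d with
  | nil => simp [pvIns]
  | cons h t ih =>
    obtain ⟨k1, v1⟩ := h
    by_cases hk : k1 = k
    · subst hk; simp [pvIns]
    · simp [pvIns, hk, ih]; tauto

theorem nodup_keys_pvIns {α : Type} (d : List (String × α)) (k : String) (v : α)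
    (h : (d.map Prod.fst).Nodup) : ((pvIns d k v).map Prod.fst).Nodup := by
  induction d with
  | nil => simp [pvIns]
  | cons hd t ih =>
    obtain ⟨k1, v1⟩ := hd
    rw [List.map_cons, List.nodup_cons] at h
    by_cases hk : k1 = k
    · subst hk
      have e : pvIns ((k1, v1) :: t) k1 v = (k1, v) :: t := by simp [pvIns]
      rw [e, List.map_cons, List.nodup_cons]
      exact h
    · have e : pvIns ((k1, v1) :: t) k v = (k1, v1) :: pvIns t k v := by simp [pvIns, hk]
      rw [e, List.map_cons, List.nodup_cons]
      refine ⟨fun hmem => ?_, ih h.2⟩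
      rcases (mem_keys_pvIns_iff t k k1 v).1 hmem with e' | hm
      · exact hk e'
      · exact h.1 hm

theorem pvIns_comm {α : Type} (d : List (String × α)) (k k1 : String) (v v1 : α)
    (hmem : k ∈ d.map Prod.fst) (hne : k ≠ k1) :
    pvIns (pvIns d k v) k1 v1 = pvIns (pvIns d k1 v1) k v := by
  induction d with
  | nil => exact absurd hmem (by simp)
  | cons h t ih =>
    obtain ⟨k', v'⟩ := h
    rw [List.map_cons, List.mem_cons] at hmem
    by_cases h1 : k' = k
    · subst h1
      have h2 : ¬ (k' = k1) := hne
      simp [pvIns, h2]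
    · rcases hmem with hmem | hmem
      · exact absurd hmem.symm h1
      · by_cases h2 : k' = k1 <;> simp [pvIns, h1, h2, Ne.symm hne, ih hmem]

theorem pvUpd_cons {α : Type} (r : List (String × α)) (a : String) (b : α) (t : List (String × α)) :
    pvUpd r ((a, b) :: t) = pvUpd (pvIns r a b) t := rfl

-- inserting at a key already present in r commutes out of an update with keys ≠ k
theorem pvUpd_pvIns_of_mem {α : Type} (t : List (String × α)) (r : List (String × α))
    (k : String) (v : α) (hr : k ∈ r.map Prod.fst) (ht : ∀ p ∈ t, p.1 ≠ k) :
    pvUpd (pvIns r k v) t = pvIns (pvUpd r t) k v := by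
  induction t generalizing r with
  | nil => simp [pvUpd]
  | cons h t ih =>
    obtain ⟨k1, v1⟩ := h
    have hne : k ≠ k1 := fun e => (ht (k1, v1) (by simp)) e.symm
    rw [pvUpd_cons, pvUpd_cons, pvIns_comm r k k1 v v1 hr hne]
    exact ih (pvIns r k1 v1) ((mem_keys_pvIns_iff _ _ _ _).2 (Or.inr hr))
      (fun p hp => ht p (List.mem_cons_of_mem _ hp))

theorem pvUpd_pvIns {α : Type} (d : List (String × α)) (r : List (String × α))
    (k : String) (v : α) (hd : (d.map Prod.fst).Nodup) :
    pvUpd r (pvIns d k v) = pvIns (pvUpd r d) k v := by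
  induction d generalizing r with
  | nil => simp [pvUpd, pvIns]
  | cons h t ih =>
    obtain ⟨k1, v1⟩ := h
    rw [List.map_cons, List.nodup_cons] at hd
    have ht' : ∀ p ∈ t, p.1 ≠ k1 := by
      intro p hp e
      have hm : p.1 ∈ t.map Prod.fst := List.mem_map.mpr ⟨p, hp, rfl⟩
      exact hd.1 (e ▸ hm)
    by_cases hk : k1 = k
    · subst hk
      have e1 : pvIns ((k1, v1) :: t) k1 v = (k1, v) :: t := by simp [pvIns]
      rw [e1, pvUpd_cons, pvUpd_cons,
          ← pvUpd_pvIns_of_mem t (pvIns r k1 v1) k1 v (mem_keys_pvIns_self r k1 v1) ht',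
          pvIns_pvIns]
    · have e2 : pvIns ((k1, v1) :: t) k v = (k1, v1) :: pvIns t k v := by simp [pvIns, hk]
      rw [e2, pvUpd_cons, pvUpd_cons]
      exact ih (pvIns r k1 v1) hd.2

-- folding B's builder step over more input commutes with updating into r
theorem pvUpd_build_fold {β : Type} (f : β → List (String × β))
    (ld : List (String × β)) (acc r : List (String × List (String × β)))
    (hacc : (acc.map Prod.fst).Nodup) :
    pvUpd r (ld.foldl (fun d kv => pvIns d kv.1 (f kv.2)) acc)
      = ld.foldl (fun d kv => pvIns d kv.1 (f kv.2)) (pvUpd r acc) := by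
  induction ld generalizing acc with
  | nil => rfl
  | cons h t ih =>
    simp only [List.foldl_cons]
    rw [ih (pvIns acc h.1 (f h.2)) (nodup_keys_pvIns _ _ _ hacc),
        pvUpd_pvIns acc r h.1 (f h.2) hacc]

-- collapse of A's innermost loop (state shape: ns[la][asset][st] = u, u grows)
theorem pvA_loop3 (sl : List String) (ns : List (String × List (String × List (String × List (String × List String)))))
    (al asset st : String)
    (w : List (String × List (String × List (String × List String))))
    (x : List (String × List (String × List String))) (u : List (String × List String)) :
    sl.foldl (fun ns sid =>
        pvMod ns al (fun d => pvMod d asset (fun e => pvMod e st (fun f => pvIns f sid ([] : List String)))))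
      (pvIns ns al (pvIns w asset (pvIns x st u)))
      = pvIns ns al (pvIns w asset (pvIns x st (sl.foldl (fun f sid => pvIns f sid []) u))) := by
  induction sl generalizing u with
  | nil => rfl
  | cons sid t ih =>
    simp only [List.foldl_cons, pvMod_pvIns]
    exact ih (pvIns u sid [])

-- collapse of the sensor_type loop
theorem pvA_loop2 (sensors : List (String × List String))
    (ns : List (String × List (String × List (String × List (String × List String)))))
    (al asset : String)
    (w : List (String × List (String × List (String × List String))))
    (x : List (String × List (String × List String))) :
    sensors.foldl (fun ns sen =>
        let ns := pvMod ns al (fun d => pvMod d asset (fun e => pvIns e sen.1 []))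
        sen.2.foldl (fun ns sid =>
          pvMod ns al (fun d => pvMod d asset (fun e => pvMod e sen.1 (fun f => pvIns f sid ([] : List String))))) ns)
      (pvIns ns al (pvIns w asset x))
      = pvIns ns al (pvIns w asset (sensors.foldl (fun e kv => pvIns e kv.1 (pvBuild3 kv.2)) x)) := by
  induction sensors generalizing x with
  | nil => rfl
  | cons sen t ih =>
    simp only [List.foldl_cons, pvMod_pvIns, pvA_loop3]
    exact ih (pvIns x sen.1 (pvBuild3 sen.2))

-- collapse of the asset loop
theorem pvA_loop1 (assets : List (String × List (String × List String)))
    (ns : List (String × List (String × List (String × List (String × List String)))))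
    (al : String)
    (w : List (String × List (String × List (String × List String)))) :
    assets.foldl (fun ns asst =>
        let ns := pvMod ns al (fun d => pvIns d asst.1 [])
        asst.2.foldl (fun ns sen =>
          let ns := pvMod ns al (fun d => pvMod d asst.1 (fun e => pvIns e sen.1 []))
          sen.2.foldl (fun ns sid =>
            pvMod ns al (fun d => pvMod d asst.1 (fun e => pvMod e sen.1 (fun f => pvIns f sid ([] : List String))))) ns) ns)
      (pvIns ns al w)
      = pvIns ns al (assets.foldl (fun d kv => pvIns d kv.1 (pvBuild2 kv.2)) w) := by
  induction assets generalizing w with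
  | nil => rfl
  | cons asst t ih =>
    simp only [List.foldl_cons, pvMod_pvIns, pvA_loop2]
    exact ih (pvIns w asst.1 (pvBuild2 asst.2))

-- A's whole outer loop builds each location's subtree directly
theorem pvA_outer (ld : List (String × List (String × List (String × List String))))
    (ns : List (String × List (String × List (String × List (String × List String))))) :
    ld.foldl (fun ns la =>
        let ns := pvIns ns la.1 []
        la.2.foldl (fun ns asst =>
          let ns := pvMod ns la.1 (fun d => pvIns d asst.1 [])
          asst.2.foldl (fun ns sen =>
            let ns := pvMod ns la.1 (fun d => pvMod d asst.1 (fun e => pvIns e sen.1 []))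
            sen.2.foldl (fun ns sid =>
              pvMod ns la.1 (fun d => pvMod d asst.1 (fun e => pvMod e sen.1 (fun f => pvIns f sid ([] : List String))))) ns) ns) ns) ns
      = ld.foldl (fun d kv => pvIns d kv.1 (pvBuild1 kv.2)) ns := by
  induction ld generalizing ns with
  | nil => rfl
  | cons la t ih =>
    simp only [List.foldl_cons]
    rw [show (pvIns ns la.1 [] : List (String × List (String × List (String × List (String × List String))))) = pvIns ns la.1 [] from rfl]
    rw [pvA_loop1 la.2 ns la.1 []]
    exact ih _

-- ===== VERDICT (by name: the statement is the Claim_ definition above) =====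
theorem create_nested_structure_spec : Claim_equal_create_nested_structure := by
  intro location location_data parent _
  unfold Spec_create_nested_structure create_nested_structure create_nested_structure_alt
  rw [pvA_outer]
  unfold pvBuild0
  rw [pvUpd_build_fold pvBuild1 location_data [] _ (by simp)]
  rfl
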